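-- pv_equiv track=rewrite | github.com/akobrz/PythonCodeWars | 6_consecutive_strings.py | longest_consec
-- ===== SOURCE A (Python) =====
-- def longest_consec(strarr, k):
--     max = 0
--     ret = ""
--
--     if k < 1 or len(strarr) < k:
--         return ""
--     else:
--         for i in range(len(strarr)):
--             length = 0
--             s = ""
--             for j in range(i, i + k):
--                 if j < len(strarr):
--                     length += len(strarr[j])
--                     s += strarr[j]
--
--             if max < length:
--                 max = length
--                 ret = s
--     return ret
-- ===== SOURCE B (Python) =====
-- def longest_consec(strarr, k):
--     # Sliding-window over string lengths: O(n + L) instead of A's O(n*k) re-scan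
--     # per start index; the winning window is concatenated once at the end.
--     n = len(strarr)
--     if k < 1 or n < k:
--         return ""
--     lens = [len(s) for s in strarr]
--     cur = sum(lens[:k])
--     best = cur
--     best_i = 0
--     for i in range(1, n - k + 1):
--         cur += lens[i + k - 1] - lens[i - 1]
--         if cur > best:
--             best = cur
--             best_i = i
--     return "".join(strarr[best_i:best_i + k])
-- ===== Notes on version B (the rewrite author's own statement) =====
-- stated objective: faster
-- what changed: A re-sums and re-concatenates each k-window from scratch for every start index; B computes all window sums incrementally with a sliding window over precomputed string lengths and concatenates only the winning window once.
import Mathlib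
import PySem

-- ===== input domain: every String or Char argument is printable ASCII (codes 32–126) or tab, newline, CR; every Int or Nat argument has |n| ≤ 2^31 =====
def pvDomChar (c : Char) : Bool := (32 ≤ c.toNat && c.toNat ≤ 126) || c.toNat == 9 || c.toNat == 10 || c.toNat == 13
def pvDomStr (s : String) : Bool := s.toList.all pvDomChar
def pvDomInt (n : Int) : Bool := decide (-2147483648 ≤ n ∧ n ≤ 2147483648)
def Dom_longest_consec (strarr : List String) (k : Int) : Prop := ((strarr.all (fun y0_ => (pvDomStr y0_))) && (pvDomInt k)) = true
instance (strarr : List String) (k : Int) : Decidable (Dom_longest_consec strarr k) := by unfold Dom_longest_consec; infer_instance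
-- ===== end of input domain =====

-- B replaces A's per-start rescan of each k-window by a sliding-window over string lengths
-- with a single final concatenation (objective: faster).

-- ===== PORT A =====
-- literal port of A: outer loop over all start indices, inner loop re-summing and
-- re-concatenating the (end-clipped) window from scratch
def longest_consec (strarr : List String) (k : Int) : String :=
  if k < 1 ∨ PySem.List.len strarr < k then ""
  else
    ((List.range strarr.length).foldl (fun (st : Int × String) (i : Nat) =>
      let inner := (PySem.List.pyRange (i : Int) ((i : Int) + k) 1).foldl
        (fun (ls : Int × String) j =>
          if j < PySem.List.len strarr then
            -- strarr[j]: the guard gives 0 ≤ j < len, so the default is never read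
            let t := PySem.List.pyGetD strarr j ""
            (ls.1 + PySem.Str.len t, ls.2 ++ t)
          else ls) (0, "")
      if st.1 < inner.1 then inner else st) (0, "")).2

-- ===== PORT B =====
-- literal port of Source B: window sums maintained incrementally, first strict maximum kept,
-- winning window concatenated once ("".join ported as String.join — exact: empty separator)
def longest_consec_alt (strarr : List String) (k : Int) : String :=
  let n := strarr.length
  if k < 1 ∨ (n : Int) < k then ""
  else
    let lens := strarr.map (fun s => PySem.Str.len s)
    let cur0 := (lens.take k.toNat).sum
    let st := (List.range (n - k.toNat)).foldl
      (fun (st : Int × Int × Nat) i0 =>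
        let i := i0 + 1
        -- lens[i + k - 1], lens[i - 1]: both indices are in range on every iteration
        let cur := st.1 + lens.getD (i + k.toNat - 1) 0 - lens.getD (i - 1) 0
        if cur > st.2.1 then (cur, cur, i) else (cur, st.2.1, st.2.2))
      (cur0, cur0, 0)
    String.join (PySem.List.slice strarr (some (st.2.2 : Int)) (some ((st.2.2 : Int) + k)))

-- ===== PRECONDITION & SPEC =====
def Spec_longest_consec (strarr : List String) (k : Int) (out : String) : Prop := out = longest_consec_alt strarr k
instance (strarr : List String) (k : Int) (out : String) : Decidable (Spec_longest_consec strarr k out) := by unfold Spec_longest_consec; infer_instance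

-- ===== CLAIM (what is proved, stated in full; the proofs are below) =====
def Claim_equal_longest_consec : Prop := ∀ (strarr : List String) (k : Int), Dom_longest_consec strarr k → Spec_longest_consec strarr k (longest_consec strarr k)

-- ===== LEMMAS AND PROOFS =====

-- the window data both programs are about
def pvLens (strarr : List String) : List Int := strarr.map (fun s => PySem.Str.len s)

def pvS (strarr : List String) (k' i : Nat) : Int := (((pvLens strarr).drop i).take k').sum

def pvW (strarr : List String) (k' i : Nat) : String := String.join ((strarr.drop i).take k')

-- A's outer step once the inner loop is summarised
def pvStepA (strarr : List String) (k' : Nat) (st : Int × String) (i : Nat) : Int × String :=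
  if st.1 < pvS strarr k' i then (pvS strarr k' i, pvW strarr k' i) else st

-- B's loop step
def pvStepB (strarr : List String) (k' : Nat) (st : Int × Int × Nat) (i0 : Nat) : Int × Int × Nat :=
  if st.1 + (pvLens strarr).getD (i0 + 1 + k' - 1) 0 - (pvLens strarr).getD (i0 + 1 - 1) 0 > st.2.1 then
    (st.1 + (pvLens strarr).getD (i0 + 1 + k' - 1) 0 - (pvLens strarr).getD (i0 + 1 - 1) 0,
     st.1 + (pvLens strarr).getD (i0 + 1 + k' - 1) 0 - (pvLens strarr).getD (i0 + 1 - 1) 0, i0 + 1)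
  else
    (st.1 + (pvLens strarr).getD (i0 + 1 + k' - 1) 0 - (pvLens strarr).getD (i0 + 1 - 1) 0,
     st.2.1, st.2.2)

theorem pv_join_acc (l : List String) (s : String) :
    l.foldl (· ++ ·) s = s ++ String.join l := by
  induction l generalizing s with
  | nil =>
    show s = s ++ String.join ([] : List String)
    rw [show String.join ([] : List String) = "" from rfl, String.append_empty]
  | cons x xs ih =>
    show xs.foldl (· ++ ·) (s ++ x) = s ++ String.join (x :: xs)
    rw [ih (s ++ x)]
    have h2 : String.join (x :: xs) = x ++ String.join xs := by
      show xs.foldl (· ++ ·) ("" ++ x) = x ++ String.join xs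
      rw [String.empty_append, ih x]
    rw [h2, String.append_assoc]

theorem pv_join_cons (x : String) (l : List String) :
    String.join (x :: l) = x ++ String.join l := by
  show l.foldl (· ++ ·) ("" ++ x) = x ++ String.join l
  rw [String.empty_append, pv_join_acc]

theorem pv_lens_length (strarr : List String) : (pvLens strarr).length = strarr.length := by
  simp [pvLens]

theorem pv_lens_nonneg (strarr : List String) {x : Int} (hx : x ∈ pvLens strarr) : 0 ≤ x := by
  simp only [pvLens, List.mem_map] at hx
  obtain ⟨s, -, rfl⟩ := hx
  rw [PySem.Str.len_eq]
  exact Int.natCast_nonneg _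

theorem pvS_nonneg (strarr : List String) (k' i : Nat) : 0 ≤ pvS strarr k' i := by
  apply List.sum_nonneg
  intro x hx
  exact pv_lens_nonneg strarr (List.mem_of_mem_drop (List.mem_of_mem_take hx))

theorem pv_join_of_len_zero (ws : List String)
    (h : (ws.map (fun s => PySem.Str.len s)).sum = 0) : String.join ws = "" := by
  induction ws with
  | nil => rfl
  | cons x xs ih =>
    simp only [List.map_cons, List.sum_cons] at h
    have hx : (0:Int) ≤ PySem.Str.len x := by
      rw [PySem.Str.len_eq]; exact Int.natCast_nonneg _
    have hxs : (0:Int) ≤ (xs.map (fun s => PySem.Str.len s)).sum := by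
      apply List.sum_nonneg
      intro y hy
      simp only [List.mem_map] at hy
      obtain ⟨s, -, rfl⟩ := hy
      rw [PySem.Str.len_eq]; exact Int.natCast_nonneg _
    have hxe : x = "" := by
      have hlen : PySem.Str.len x = 0 := by linarith
      rw [PySem.Str.len_eq] at hlen
      apply String.length_eq_zero_iff.mp
      exact_mod_cast hlen
    rw [pv_join_cons, ih (by omega), hxe, String.append_empty]

-- a window of total length 0 concatenates to ""
theorem pvW_of_S_zero (strarr : List String) (k' i : Nat) (h : pvS strarr k' i = 0) :
    pvW strarr k' i = "" := by
  unfold pvS at h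
  have hmap : ((pvLens strarr).drop i).take k'
      = ((strarr.drop i).take k').map (fun s => PySem.Str.len s) := by
    rw [pvLens, ← List.map_drop, ← List.map_take]
  rw [hmap] at h
  exact pv_join_of_len_zero _ h

-- the inner loop of A computes the clipped-window sum and concatenation
theorem pv_innerA (strarr : List String) (c i : Nat) (acc : Int × String) :
    (PySem.List.pyRange (i : Int) ((i : Int) + (c : Int)) 1).foldl
      (fun (ls : Int × String) j =>
        if j < (strarr.length : Int) then
          (ls.1 + PySem.Str.len (PySem.List.pyGetD strarr j ""), ls.2 ++ PySem.List.pyGetD strarr j "")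
        else ls) acc
    = (acc.1 + pvS strarr c i, acc.2 ++ pvW strarr c i) := by
  induction c generalizing i acc with
  | zero =>
    simp only [Nat.cast_zero, add_zero]
    rw [PySem.List.pyRange_one_eq_nil (le_refl _)]
    simp [pvS, pvW, String.join, String.append_empty]
  | succ c ih =>
    rw [show ((i : Int) + ((c+1 : Nat) : Int)) = ((i+1 : Nat) : Int) + (c : Int) by push_cast; ring,
      PySem.List.pyRange_one_cons (by push_cast; omega)]
    simp only [List.foldl_cons]
    rw [show ((i : Int) + 1) = ((i+1 : Nat) : Int) by push_cast; ring]
    by_cases hi : i < strarr.length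
    · have hcond : ((i : Int) < (strarr.length : Int)) := by exact_mod_cast hi
      rw [if_pos hcond]
      simp only [PySem.List.pyGetD_natCast, List.getD_eq_getElem strarr "" hi]
      rw [ih (i+1) _]
      have hdropS : (pvLens strarr).drop i = PySem.Str.len strarr[i] :: (pvLens strarr).drop (i+1) := by
        rw [List.drop_eq_getElem_cons (by rw [pv_lens_length]; exact hi)]
        congr 1
        simp [pvLens]
      have hdropW : strarr.drop i = strarr[i] :: strarr.drop (i+1) :=
        List.drop_eq_getElem_cons hi
      have hS : pvS strarr (c+1) i = PySem.Str.len strarr[i] + pvS strarr c (i+1) := by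
        unfold pvS
        rw [hdropS, List.take_succ_cons, List.sum_cons]
      have hW : pvW strarr (c+1) i = strarr[i] ++ pvW strarr c (i+1) := by
        unfold pvW
        rw [hdropW, List.take_succ_cons, pv_join_cons]
      rw [hS, hW, String.append_assoc]
      congr 1
      ring
    · have hcond : ¬ ((i : Int) < (strarr.length : Int)) := by
        intro h; exact hi (by exact_mod_cast h)
      rw [if_neg hcond, ih (i+1) acc]
      have h1 : strarr.drop i = [] := List.drop_eq_nil_of_le (by omega)
      have h2 : strarr.drop (i+1) = [] := List.drop_eq_nil_of_le (by omega)
      have h3 : (pvLens strarr).drop i = [] := List.drop_eq_nil_of_le (by rw [pv_lens_length]; omega)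
      have h4 : (pvLens strarr).drop (i+1) = [] := List.drop_eq_nil_of_le (by rw [pv_lens_length]; omega)
      simp [pvS, pvW, h1, h2, h3, h4]

-- sliding-window identity: one step moves the sum by the entering minus the leaving length
theorem pv_slide (strarr : List String) (k' i0 : Nat) (hk : 1 ≤ k')
    (h : i0 + k' < strarr.length) :
    pvS strarr k' (i0 + 1)
      = pvS strarr k' i0 + (pvLens strarr).getD (i0 + k') 0 - (pvLens strarr).getD i0 0 := by
  have hl := pv_lens_length strarr
  have h0 : i0 < (pvLens strarr).length := by omega
  have h1 : i0 + k' < (pvLens strarr).length := by omega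
  obtain ⟨c, rfl⟩ : ∃ c, k' = c + 1 := ⟨k' - 1, by omega⟩
  have hS0 : pvS strarr (c+1) i0
      = (pvLens strarr)[i0] + (((pvLens strarr).drop (i0+1)).take c).sum := by
    unfold pvS
    rw [List.drop_eq_getElem_cons h0, List.take_succ_cons, List.sum_cons]
  have hS1 : pvS strarr (c+1) (i0+1)
      = (((pvLens strarr).drop (i0+1)).take c).sum + (pvLens strarr)[i0 + (c+1)] := by
    unfold pvS
    rw [List.take_add_one, List.sum_append]
    congr 1
    rw [List.getElem?_drop]
    rw [show i0 + 1 + c = i0 + (c+1) by omega]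
    rw [List.getElem?_eq_getElem h1]
    simp
  rw [hS0, hS1, List.getD_eq_getElem _ 0 h1, List.getD_eq_getElem _ 0 h0]
  ring

-- suffix sums of the (nonnegative) length list shrink as the suffix shrinks
theorem pv_sum_drop_le (strarr : List String) {a b : Nat} (hab : a ≤ b) :
    ((pvLens strarr).drop b).sum ≤ ((pvLens strarr).drop a).sum := by
  have hdb : (pvLens strarr).drop b = ((pvLens strarr).drop a).drop (b - a) := by
    rw [List.drop_drop]
    congr 1
    omega
  rw [hdb]
  exact List.Sublist.sum_le_sum (List.drop_sublist _ _)
    (fun x hx => pv_lens_nonneg strarr (List.mem_of_mem_drop hx))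

theorem pvS_le_sum_drop (strarr : List String) (k' i : Nat) :
    pvS strarr k' i ≤ ((pvLens strarr).drop i).sum := by
  unfold pvS
  exact List.Sublist.sum_le_sum (List.take_sublist _ _)
    (fun x hx => pv_lens_nonneg strarr (List.mem_of_mem_drop hx))

-- every clipped tail window is dominated by the last full window
theorem pvS_tail_le (strarr : List String) (k' i : Nat) (hk : k' ≤ strarr.length)
    (hi : strarr.length - k' ≤ i) :
    pvS strarr k' i ≤ pvS strarr k' (strarr.length - k') := by
  have hfull : pvS strarr k' (strarr.length - k')
      = ((pvLens strarr).drop (strarr.length - k')).sum := by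
    unfold pvS
    congr 1
    apply List.take_of_length_le
    rw [List.length_drop, pv_lens_length]
    omega
  calc pvS strarr k' i ≤ ((pvLens strarr).drop i).sum := pvS_le_sum_drop strarr k' i
    _ ≤ ((pvLens strarr).drop (strarr.length - k')).sum := pv_sum_drop_le strarr hi
    _ = pvS strarr k' (strarr.length - k') := hfull.symm

-- A's loop ignores indices whose window sum cannot beat the current maximum
theorem pv_tail_noop (strarr : List String) (k' : Nat) :
    ∀ (l : List Nat) (st : Int × String), (∀ i ∈ l, pvS strarr k' i ≤ st.1) →
      l.foldl (pvStepA strarr k') st = st := by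
  intro l
  induction l with
  | nil => intro st _; rfl
  | cons x xs ih =>
    intro st h
    simp only [List.foldl_cons]
    rw [show pvStepA strarr k' st x = st by
      unfold pvStepA
      rw [if_neg (by have := h x (by simp); omega)]]
    exact ih st (fun i hi => h i (by simp [hi]))

-- the loop-state correspondence
def pvInv (strarr : List String) (k' m : Nat) (a : Int × String) (b : Int × Int × Nat) : Prop :=
  b.1 = pvS strarr k' m ∧ a.1 = b.2.1 ∧ b.2.1 = pvS strarr k' b.2.2 ∧
    (∀ j ≤ m, pvS strarr k' j ≤ b.2.1) ∧ (a.1 = 0 → a.2 = "") ∧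
    (0 < a.1 → a.2 = pvW strarr k' b.2.2)

theorem pv_main (strarr : List String) (k' : Nat) (hk : 1 ≤ k') (hkn : k' ≤ strarr.length) :
    ∀ m, m ≤ strarr.length - k' →
      pvInv strarr k' m
        ((List.range (m+1)).foldl (pvStepA strarr k') (0, ""))
        ((List.range m).foldl (pvStepB strarr k')
          (pvS strarr k' 0, pvS strarr k' 0, 0)) := by
  intro m
  induction m with
  | zero =>
    intro _
    rw [show List.range (0+1) = [0] from rfl, show List.range 0 = [] from rfl]
    simp only [List.foldl_cons, List.foldl_nil]
    unfold pvInv pvStepA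
    by_cases h0 : ((0:Int), "").1 < pvS strarr k' 0
    · rw [if_pos h0]
      have h0' : (0:Int) < pvS strarr k' 0 := h0
      refine ⟨rfl, rfl, rfl, ?_, ?_, fun _ => rfl⟩
      · intro j hj
        have hj0 : j = 0 := Nat.le_zero.mp hj
        subst hj0
        show pvS strarr k' 0 ≤ pvS strarr k' 0
        exact le_refl _
      · intro h
        exfalso
        have h' : pvS strarr k' 0 = 0 := h
        omega
    · rw [if_neg h0]
      have h0' : ¬ (0:Int) < pvS strarr k' 0 := h0
      have hz : pvS strarr k' 0 = 0 := le_antisymm (by omega) (pvS_nonneg strarr k' 0)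
      refine ⟨rfl, ?_, rfl, ?_, fun _ => rfl, ?_⟩
      · show (0:Int) = pvS strarr k' 0
        omega
      · intro j hj
        have hj0 : j = 0 := Nat.le_zero.mp hj
        subst hj0
        show pvS strarr k' 0 ≤ pvS strarr k' 0
        exact le_refl _
      · intro h
        exfalso
        have h' : (0:Int) < 0 := h
        omega
  | succ m ih =>
    intro hm
    have ihm := ih (by omega)
    unfold pvInv at ihm
    have hAeq : (List.range (m+1+1)).foldl (pvStepA strarr k') (0, "")
        = pvStepA strarr k' ((List.range (m+1)).foldl (pvStepA strarr k') (0, "")) (m+1) := by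
      rw [List.range_succ, List.foldl_append, List.foldl_cons, List.foldl_nil]
    have hBeq : (List.range (m+1)).foldl (pvStepB strarr k') (pvS strarr k' 0, pvS strarr k' 0, 0)
        = pvStepB strarr k'
            ((List.range m).foldl (pvStepB strarr k') (pvS strarr k' 0, pvS strarr k' 0, 0)) m := by
      rw [List.range_succ, List.foldl_append, List.foldl_cons, List.foldl_nil]
    rw [hAeq, hBeq]
    set a := (List.range (m+1)).foldl (pvStepA strarr k') (0, "") with ha
    set b := (List.range m).foldl (pvStepB strarr k') (pvS strarr k' 0, pvS strarr k' 0, 0) with hb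
    obtain ⟨hb1, hab, hbS, hmax, hz, hw⟩ := ihm
    have hcur : b.1 + (pvLens strarr).getD (m + 1 + k' - 1) 0 - (pvLens strarr).getD (m + 1 - 1) 0
        = pvS strarr k' (m+1) := by
      rw [hb1, show m + 1 + k' - 1 = m + k' by omega, show m + 1 - 1 = m by omega]
      rw [pv_slide strarr k' m hk (by omega)]
    unfold pvInv pvStepA pvStepB
    rw [hcur]
    by_cases hgt : pvS strarr k' (m+1) > b.2.1
    · rw [if_pos hgt, if_pos (show a.1 < pvS strarr k' (m+1) by omega)]
      refine ⟨rfl, rfl, rfl, ?_, ?_, fun _ => rfl⟩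
      · intro j hj
        show pvS strarr k' j ≤ pvS strarr k' (m+1)
        rcases Nat.lt_or_ge j (m+1) with hj' | hj'
        · have := hmax j (by omega)
          omega
        · have hjm : j = m + 1 := by omega
          subst hjm
          exact le_refl _
      · intro h
        exfalso
        have h' : pvS strarr k' (m+1) = 0 := h
        have := pvS_nonneg strarr k' b.2.2
        omega
    · rw [if_neg hgt, if_neg (show ¬ a.1 < pvS strarr k' (m+1) by omega)]
      refine ⟨rfl, hab, hbS, ?_, hz, hw⟩
      intro j hj
      show pvS strarr k' j ≤ b.2.1
      rcases Nat.lt_or_ge j (m+1) with hj' | hj'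
      · exact hmax j (by omega)
      · have hjm : j = m + 1 := by omega
        subst hjm
        omega

-- ===== VERDICT (by name: the statement is the Claim_ definition above) =====
theorem longest_consec_spec : Claim_equal_longest_consec := by
  intro strarr k _
  show longest_consec strarr k = longest_consec_alt strarr k
  simp only [longest_consec, longest_consec_alt, PySem.List.len_eq]
  by_cases hc : k < 1 ∨ ((strarr.length : Int) < k)
  · rw [if_pos hc, if_pos hc]
  · rw [if_neg hc, if_neg hc]
    have hk1 : 1 ≤ k := by omega
    have hkn : k ≤ (strarr.length : Int) := by omega
    set n := strarr.length with hn
    set k' := k.toNat with hk'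
    have hkk : (k' : Int) = k := Int.toNat_of_nonneg (by omega)
    have hk1' : 1 ≤ k' := by omega
    have hkn' : k' ≤ n := by omega
    -- A's fold is the summarised fold
    have hA : ∀ init, ((List.range n).foldl (fun (st : Int × String) (i : Nat) =>
        if st.1 < ((PySem.List.pyRange (i : Int) ((i : Int) + k) 1).foldl
            (fun (ls : Int × String) j =>
              if j < (strarr.length : Int) then
                (ls.1 + PySem.Str.len (PySem.List.pyGetD strarr j ""),
                 ls.2 ++ PySem.List.pyGetD strarr j "")
              else ls) (0, "")).1 then
          ((PySem.List.pyRange (i : Int) ((i : Int) + k) 1).foldl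
            (fun (ls : Int × String) j =>
              if j < (strarr.length : Int) then
                (ls.1 + PySem.Str.len (PySem.List.pyGetD strarr j ""),
                 ls.2 ++ PySem.List.pyGetD strarr j "")
              else ls) (0, ""))
        else st) init)
        = (List.range n).foldl (pvStepA strarr k') init := by
      intro init
      apply PySem.List.foldl_congr_mem
      intro st i _
      rw [← hkk, pv_innerA strarr k' i (0, "")]
      unfold pvStepA
      rw [zero_add, String.empty_append]
    rw [hA]
    -- B's fold is the summarised fold
    have hB : ∀ init, ((List.range (n - k')).foldl
        (fun (st : Int × Int × Nat) i0 =>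
          if st.1 + (strarr.map (fun s => PySem.Str.len s)).getD (i0 + 1 + k' - 1) 0
              - (strarr.map (fun s => PySem.Str.len s)).getD (i0 + 1 - 1) 0 > st.2.1 then
            (st.1 + (strarr.map (fun s => PySem.Str.len s)).getD (i0 + 1 + k' - 1) 0
              - (strarr.map (fun s => PySem.Str.len s)).getD (i0 + 1 - 1) 0,
             st.1 + (strarr.map (fun s => PySem.Str.len s)).getD (i0 + 1 + k' - 1) 0
              - (strarr.map (fun s => PySem.Str.len s)).getD (i0 + 1 - 1) 0, i0 + 1)
          else
            (st.1 + (strarr.map (fun s => PySem.Str.len s)).getD (i0 + 1 + k' - 1) 0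
              - (strarr.map (fun s => PySem.Str.len s)).getD (i0 + 1 - 1) 0,
             st.2.1, st.2.2)) init)
        = (List.range (n - k')).foldl (pvStepB strarr k') init := by
      intro init
      apply PySem.List.foldl_congr_mem
      intro st i0 _
      unfold pvStepB pvLens
      rfl
    have hsum0 : ((strarr.map (fun s => PySem.Str.len s)).take k').sum = pvS strarr k' 0 := by
      simp [pvS, pvLens]
    rw [hB, hsum0]
    -- split A's range: full windows first, then the clipped tail which is a no-op
    have hsplit : List.range n = List.range (n - k' + 1) ++
        (List.range (k' - 1)).map (fun x => (n - k' + 1) + x) := by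
      conv_lhs => rw [show n = (n - k' + 1) + (k' - 1) from by omega]
      rw [List.range_add]
    rw [hsplit, List.foldl_append]
    obtain ⟨hb1, hab, hbS, hmax, hz, hw⟩ := pv_main strarr k' hk1' hkn' (n - k') (le_refl _)
    set a := (List.range (n - k' + 1)).foldl (pvStepA strarr k') (0, "") with ha
    set b := (List.range (n - k')).foldl (pvStepB strarr k')
      (pvS strarr k' 0, pvS strarr k' 0, 0) with hbdef
    have hnoop : ((List.range (k' - 1)).map (fun x => (n - k' + 1) + x)).foldl
        (pvStepA strarr k') a = a := by
      apply pv_tail_noop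
      intro i hi
      simp only [List.mem_map] at hi
      obtain ⟨d, -, rfl⟩ := hi
      calc pvS strarr k' (n - k' + 1 + d) ≤ pvS strarr k' (n - k') :=
            pvS_tail_le strarr k' _ hkn' (by omega)
        _ ≤ b.2.1 := hmax (n - k') (le_refl _)
        _ = a.1 := hab.symm
    rw [hnoop]
    -- the returned strings agree
    have hslice : PySem.List.slice strarr (some ((b.2.2 : Nat) : Int))
        (some (((b.2.2 : Nat) : Int) + k)) = (strarr.drop b.2.2).take k' := by
      rw [← hkk]
      exact PySem.List.slice_natCast_add ..
    rw [hslice]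
    show a.2 = pvW strarr k' b.2.2
    rcases lt_or_eq_of_le (pvS_nonneg strarr k' b.2.2) with hpos | hzero
    · exact hw (by omega)
    · rw [pvW_of_S_zero strarr k' b.2.2 hzero.symm]
      exact hz (by omega)
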